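-- pv_equiv track=rewrite | github.com/kissyass/murat-projects | seo-blog-for-company/utils.py | insert_images_evenly
-- ===== SOURCE A (Python) =====
-- def insert_images_evenly(article_text, image_tags):
--     """Insert image HTML tags evenly between paragraphs of article_text.
--        image_tags should be a list of image tag strings.
--     """
--     paragraphs = article_text.split("\n\n")
--     num_paragraphs = len(paragraphs)
--     num_images = len(image_tags)
--     if num_images == 0 or num_paragraphs == 0:
--         return article_text
--     # Determine the interval at which to insert images.
--     interval = max(1, num_paragraphs // (num_images + 1))
--     new_paragraphs = []
--     img_index = 0
--     for i, para in enumerate(paragraphs):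
--         new_paragraphs.append(para)
--         if (i + 1) % interval == 0 and img_index < num_images:
--             new_paragraphs.append(image_tags[img_index])
--             img_index += 1
--     return "\n\n".join(new_paragraphs)
-- ===== SOURCE B (Python) =====
-- def insert_images_evenly(article_text, image_tags):
--     """Insert image HTML tags evenly between paragraphs of article_text.
--        Chunk-based: walks the images, copying interval-sized slices of
--        paragraphs between them, instead of testing every paragraph index."""
--     paragraphs = article_text.split("\n\n")
--     if not image_tags:
--         return article_text
--     interval = max(1, len(paragraphs) // (len(image_tags) + 1))
--     result = []
--     idx = 0
--     for tag in image_tags: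
--         end = idx + interval
--         if end > len(paragraphs):
--             break
--         result.extend(paragraphs[idx:end])
--         result.append(tag)
--         idx = end
--     result.extend(paragraphs[idx:])
--     return "\n\n".join(result)
-- ===== Notes on version B (the rewrite author's own statement) =====
-- stated objective: alternative
-- what changed: Replaces A's per-paragraph enumerate loop with a modulo test and an image cursor by a per-image loop that copies interval-sized slices of paragraphs between the tags and appends the remaining paragraphs once at the end.
import Mathlib
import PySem

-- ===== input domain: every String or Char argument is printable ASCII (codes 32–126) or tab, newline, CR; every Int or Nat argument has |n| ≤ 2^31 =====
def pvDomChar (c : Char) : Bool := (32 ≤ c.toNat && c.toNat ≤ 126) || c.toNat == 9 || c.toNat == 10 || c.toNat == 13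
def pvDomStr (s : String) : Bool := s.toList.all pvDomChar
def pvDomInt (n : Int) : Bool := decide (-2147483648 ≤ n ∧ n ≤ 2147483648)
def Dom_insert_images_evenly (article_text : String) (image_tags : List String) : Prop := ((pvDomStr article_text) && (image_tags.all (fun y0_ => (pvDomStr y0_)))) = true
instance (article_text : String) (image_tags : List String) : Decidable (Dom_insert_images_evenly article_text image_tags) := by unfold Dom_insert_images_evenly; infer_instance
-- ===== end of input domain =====

-- B replaces A's per-paragraph enumerate/modulo loop by a per-image loop that copies
-- interval-sized paragraph chunks (slices) between the tags; same result, alternative decomposition.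


-- ===== PORT A =====
-- literal transliteration of A: split on "\n\n", then a per-paragraph enumerate loop
-- appending the next image after every interval-th paragraph while images remain.
-- image_tags[img_index] is guarded by img_index < num_images, so getD is exact here.
def insert_images_evenly (article_text : String) (image_tags : List String) : String :=
  let paragraphs : List String :=
    (PySem.Chars.splitOn article_text.toList ['\n', '\n']).map String.ofList
  let num_paragraphs := paragraphs.length
  let num_images := image_tags.length
  if num_images = 0 ∨ num_paragraphs = 0 then article_text
  else
    let interval : Nat := max 1 (num_paragraphs / (num_images + 1))
    let st :=
      (PySem.List.enumerate paragraphs).foldl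
        (fun (st : List String × Nat) (ip : Int × String) =>
          let np := st.1 ++ [ip.2]
          if PySem.Int.mod (ip.1 + 1) (interval : Int) = 0 ∧ st.2 < num_images then
            (np ++ [image_tags.getD st.2 ""], st.2 + 1)
          else (np, st.2))
        ([], 0)
    PySem.Str.join "\n\n" st.1

-- ===== PORT B =====
-- B-side helper: the for-tag loop of Source B as structural recursion over the tag list;
-- the `break` (end > len(paragraphs)) and the trailing result.extend(paragraphs[idx:])
-- become returning the remaining paragraphs; the slice paragraphs[idx:end] with
-- 0 ≤ idx ≤ end is exactly take/drop of the remaining list.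
def insertChunks (interval : Nat) : List String → List String → List String
  | paras, [] => paras
  | paras, t :: rest =>
    if paras.length < interval then paras
    else paras.take interval ++ t :: insertChunks interval (paras.drop interval) rest

def insert_images_evenly_alt (article_text : String) (image_tags : List String) : String :=
  let paragraphs : List String :=
    (PySem.Chars.splitOn article_text.toList ['\n', '\n']).map String.ofList
  if image_tags = [] then article_text
  else
    let interval : Nat := max 1 (paragraphs.length / (image_tags.length + 1))
    PySem.Str.join "\n\n" (insertChunks interval paragraphs image_tags)

-- ===== PRECONDITION & SPEC =====
def Spec_insert_images_evenly (article_text : String) (image_tags : List String) (out : String) : Prop := out = insert_images_evenly_alt article_text image_tags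
instance (article_text : String) (image_tags : List String) (out : String) : Decidable (Spec_insert_images_evenly article_text image_tags out) := by unfold Spec_insert_images_evenly; infer_instance

-- ===== CLAIM (what is proved, stated in full; the proofs are below) =====
def Claim_equal_insert_images_evenly : Prop := ∀ (article_text : String) (image_tags : List String), Dom_insert_images_evenly article_text image_tags → Spec_insert_images_evenly article_text image_tags (insert_images_evenly article_text image_tags)

-- ===== LEMMAS AND PROOFS =====

-- Python split with a separator never returns an empty list.
theorem splitOn_go_ne_nil (sep : List Char) (fuel : Nat) (l cur : List Char)
    (acc : List (List Char)) : PySem.Chars.splitOn.go sep fuel l cur acc ≠ [] := by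
  induction fuel generalizing l cur acc with
  | zero => rw [PySem.Chars.splitOn.go.eq_def]; simp
  | succ fuel ih =>
      rw [PySem.Chars.splitOn.go.eq_def]
      cases l with
      | nil => simp
      | cons c rest => dsimp only; split <;> exact ih _ _ _

theorem splitOn_ne_nil (s sep : List Char) : PySem.Chars.splitOn s sep ≠ [] :=
  splitOn_go_ne_nil sep _ s [] []

-- recursive form of A's loop (index and img_index as naturals)
def agoA (m : Nat) (tags : List String) : List String → Nat → Nat → List String
  | [], _, _ => []
  | p :: r, i, c =>
    if (i + 1) % m = 0 ∧ c < tags.length then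
      p :: tags.getD c "" :: agoA m tags r (i + 1) (c + 1)
    else p :: agoA m tags r (i + 1) c

theorem mod_cast_eq (i m : Nat) :
    PySem.Int.mod ((i : Int) + 1) (m : Int) = 0 ↔ (i + 1) % m = 0 := by
  unfold PySem.Int.mod
  have h1 : ((i : Int) + 1).fmod (m : Int) = ((i : Int) + 1) % (m : Int) := by
    rw [Int.fmod_eq_emod]; simp
  rw [h1, show ((i : Int) + 1) = ((i + 1 : Nat) : Int) by push_cast; ring,
    ← Int.natCast_mod]
  omega

-- A's foldl over enumerate computes agoA
theorem foldA (m : Nat) (tags : List String) (ps : List String)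
    (s : Nat) (acc : List String) (c : Nat) :
    (((PySem.List.enumerate ps (s : Int)).foldl
      (fun (st : List String × Nat) (ip : Int × String) =>
        let np := st.1 ++ [ip.2]
        if PySem.Int.mod (ip.1 + 1) (m : Int) = 0 ∧ st.2 < tags.length then
          (np ++ [tags.getD st.2 ""], st.2 + 1)
        else (np, st.2))
      (acc, c)).1) = acc ++ agoA m tags ps s c := by
  induction ps generalizing s acc c with
  | nil => simp [PySem.List.enumerate_nil, agoA]
  | cons p r ih =>
      rw [PySem.List.enumerate_cons, List.foldl_cons]
      dsimp only
      rw [agoA]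
      by_cases h : (s + 1) % m = 0 ∧ c < tags.length
      · rw [if_pos, if_pos h]
        · have := ih (s + 1) (acc ++ [p] ++ [tags.getD c ""]) (c + 1)
          push_cast at this ⊢
          rw [this]; simp
        · exact ⟨by rw [mod_cast_eq s m]; exact h.1, h.2⟩
      · rw [if_neg, if_neg h]
        · have := ih (s + 1) (acc ++ [p]) c
          push_cast at this ⊢
          rw [this]; simp
        · intro hc; exact h ⟨(mod_cast_eq s m).mp hc.1, hc.2⟩

theorem agoA_no_tags (m : Nat) (tags : List String) (ps : List String) (s c : Nat)
    (hc : ¬ c < tags.length) : agoA m tags ps s c = ps := by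
  induction ps generalizing s with
  | nil => rfl
  | cons p r ih => rw [agoA, if_neg (fun h => hc h.2), ih]

theorem agoA_skip (m : Nat) (tags : List String) (ps : List String) (s c : Nat)
    (h : ∀ j, 1 ≤ j → j ≤ ps.length → (s + j) % m ≠ 0) :
    agoA m tags ps s c = ps := by
  induction ps generalizing s with
  | nil => rfl
  | cons p r ih =>
      rw [agoA, if_neg, ih]
      · intro j h1 h2
        have h3 := h (j + 1) (by omega) (by simp; omega)
        rw [show s + 1 + j = s + (j + 1) from by omega]
        exact h3
      · intro hc
        exact h 1 le_rfl (by simp) hc.1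

theorem agoA_chunk (m : Nat) (tags : List String) (k : Nat) (ps : List String)
    (s c : Nat) (hk1 : 1 ≤ k) (hk2 : k ≤ ps.length) (hm : (s + k) % m = 0)
    (hmid : ∀ j, 1 ≤ j → j < k → (s + j) % m ≠ 0) (hc : c < tags.length) :
    agoA m tags ps s c =
      ps.take k ++ tags.getD c "" :: agoA m tags (ps.drop k) (s + k) (c + 1) := by
  induction k generalizing ps s with
  | zero => omega
  | succ k ih =>
      cases ps with
      | nil => simp at hk2
      | cons p r =>
        rcases Nat.eq_zero_or_pos k with hk0 | hkpos
        · subst hk0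
          rw [agoA, if_pos ⟨by simpa using hm, hc⟩]
          simp
        · have h1 : (s + 1) % m ≠ 0 := by
            have := hmid 1 le_rfl (by omega); simpa using this
          rw [agoA, if_neg (fun hcontra => h1 hcontra.1)]
          rw [ih r (s + 1) hkpos (by simpa using hk2)
            (by rw [show s + 1 + k = s + (k + 1) by omega]; exact hm)
            (fun j hj1 hj2 => by
              rw [show s + 1 + j = s + (j + 1) by omega]
              exact hmid (j + 1) (by omega) (by omega))]
          simp [show s + 1 + k = s + (k + 1) by omega]

theorem agoA_eq_chunks (m : Nat) (hm : 0 < m) (tags : List String)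
    (ps : List String) (s c : Nat) (hs : s % m = 0) :
    agoA m tags ps s c = insertChunks m ps (tags.drop c) := by
  induction hn : ps.length using Nat.strong_induction_on generalizing ps s c with
  | _ n ih =>
  subst hn
  cases htc : tags.drop c with
  | nil =>
      rw [insertChunks, agoA_no_tags]
      intro hlt
      have : tags.drop c ≠ [] := by
        simp only [ne_eq, List.drop_eq_nil_iff]; omega
      exact this htc
  | cons t rr =>
      have hc : c < tags.length := by
        by_contra hge
        rw [List.drop_eq_nil_iff.mpr (by omega)] at htc; simp at htc
      rw [insertChunks]
      by_cases hlen : ps.length < m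
      · rw [if_pos hlen, agoA_skip]
        intro j h1 h2 hj
        have : j % m = 0 := by
          rwa [Nat.add_mod, hs, Nat.zero_add, Nat.mod_mod_of_dvd j (dvd_refl m)] at hj
        have := Nat.mod_eq_of_lt (show j < m by omega)
        omega
      · rw [if_neg hlen]
        have hgd : tags.getD c "" = t := by
          have : tags.getD c "" = (tags.drop c).getD 0 "" := by
            simp [List.getD, List.getElem?_drop]
          rw [this, htc]; rfl
        have hdrop1 : tags.drop (c + 1) = rr := by
          have : tags.drop (c + 1) = (tags.drop c).drop 1 := by
            rw [List.drop_drop]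
          rw [this, htc]; rfl
        rw [agoA_chunk m tags m ps s c hm (by omega)
          (by rw [Nat.add_mod, hs]; simp)
          (fun j h1 h2 hj => by
            have : j % m = 0 := by
              rwa [Nat.add_mod, hs, Nat.zero_add, Nat.mod_mod_of_dvd j (dvd_refl m)] at hj
            have := Nat.mod_eq_of_lt h2; omega) hc]
        rw [hgd, ih (ps.drop m).length (by simp; omega) (ps.drop m) (s + m) (c + 1)
          (by rw [Nat.add_mod, hs]; simp) rfl, hdrop1]

-- ===== VERDICT (by name: the statement is the Claim_ definition above) =====
theorem insert_images_evenly_spec : Claim_equal_insert_images_evenly := by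
  intro article_text image_tags _
  unfold Spec_insert_images_evenly insert_images_evenly insert_images_evenly_alt
  cases himg : image_tags with
  | nil => simp
  | cons t ts =>
      subst himg
      set ps := (PySem.Chars.splitOn article_text.toList ['\n', '\n']).map String.ofList with hps
      have hpne : ps ≠ [] := by
        simpa [hps] using splitOn_ne_nil article_text.toList ['\n', '\n']
      rw [if_neg (by simp; exact fun h => absurd h hpne), if_neg (by simp)]
      have hm : 0 < max 1 (ps.length / ((t :: ts).length + 1)) := by
        exact lt_of_lt_of_le one_pos (le_max_left _ _)
      dsimp only
      congr 1
      have hfold := foldA (max 1 (ps.length / ((t :: ts).length + 1))) (t :: ts) ps 0 [] 0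
      simp only [Nat.cast_zero] at hfold
      rw [hfold, List.nil_append,
        agoA_eq_chunks _ hm (t :: ts) ps 0 0 (Nat.zero_mod _), List.drop_zero]
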